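-- pv_equiv track=rewrite | github.com/ShapovalovIlia/YSDA-Python | 03.1.FunctionsStringsIO/tasks/count_util/count_util.py | count_util
-- ===== SOURCE A (Python) =====
-- def count_util(text: str, flags: str | None = None) -> dict[str, int]:
--     """
--     :param text: text to count entities
--     :param flags: flags in command-like format - can be:
--         * -m stands for counting characters
--         * -l stands for counting lines
--         * -L stands for getting length of the longest line
--         * -w stands for counting words
--     More than one flag can be passed at the same time, for example:
--         * "-l -m"
--         * "-lLw"
--     Ommiting flags or passing empty string is equivalent to "-mlLw"
--     :return: mapping from string keys to corresponding counter, where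
--     keys are selected according to the received flags:
--         * "chars" - amount of characters
--         * "lines" - amount of lines
--         * "longest_line" - the longest line length
--         * "words" - amount of words
--     """
--     dct: dict[str, int] = dict()
--
--     if flags is None or flags == '' or 'm' in flags:
--         dct["chars"] = len(text)
--
--     if flags is None or flags == '' or 'l' in flags:
--         dct["lines"] = text.count('\n')
--
--     if flags is None or flags == '' or 'L' in flags:
--         dct["longest_line"] = max(len(line) for line in text.split('\n'))
--
--     if flags is None or flags == '' or 'w' in flags:
--         dct["words"] = len(text.split())
--
--     return dct
-- ===== SOURCE B (Python) =====
-- def count_util(text: str, flags: str | None = None) -> dict[str, int]: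
--     chars = 0
--     lines = 0
--     cur = 0
--     longest = 0
--     words = 0
--     in_word = False
--     for ch in text:
--         chars += 1
--         if ch == '\n':
--             lines += 1
--             cur = 0
--         else:
--             cur += 1
--         if cur > longest:
--             longest = cur
--         if ch.isspace():
--             in_word = False
--         elif not in_word:
--             in_word = True
--             words += 1
--
--     def want(f: str) -> bool:
--         return flags is None or flags == '' or f in flags
--
--     counts = [("chars", chars, "m"), ("lines", lines, "l"),
--               ("longest_line", longest, "L"), ("words", words, "w")]
--     return {k: v for k, v, f in counts if want(f)}
-- ===== Notes on version B (the rewrite author's own statement) =====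
-- stated objective: alternative
-- what changed: A makes four independent library passes over the text (length, newline count, split-on-newline with a max scan, whitespace split); B makes one single pass over the characters maintaining running counters for chars, lines, current/longest line length and word-start transitions, then assembles the dict by filtering a fixed (key, value, flag) table.
import Mathlib
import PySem

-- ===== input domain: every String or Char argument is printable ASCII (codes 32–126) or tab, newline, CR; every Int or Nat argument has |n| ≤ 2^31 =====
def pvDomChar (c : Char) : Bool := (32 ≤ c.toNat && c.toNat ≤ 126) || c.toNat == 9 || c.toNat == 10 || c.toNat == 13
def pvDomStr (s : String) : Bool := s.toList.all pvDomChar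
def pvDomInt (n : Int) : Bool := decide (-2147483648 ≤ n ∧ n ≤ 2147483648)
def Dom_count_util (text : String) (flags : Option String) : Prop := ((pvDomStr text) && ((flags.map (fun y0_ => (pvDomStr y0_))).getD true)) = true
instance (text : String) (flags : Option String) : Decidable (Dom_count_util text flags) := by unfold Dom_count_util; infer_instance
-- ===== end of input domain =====

-- B replaces A's four independent library passes (len / count / split('\n') / split()) by ONE
-- character pass maintaining all four counters; same result, alternative decomposition.

-- ===== PORT A =====
-- the flag guard `flags is None or flags == '' or '<f>' in flags` (shared: identical in A and Source B's `want`)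
def pvFlagOn (flags : Option String) (f : String) : Bool :=
  match flags with
  | none => true
  | some s => (s == "") || PySem.Str.isIn f s

def count_util (text : String) (flags : Option String) : List (String × Int) :=
  let d : PySem.Dict String Int := PySem.Dict.empty
  let d := if pvFlagOn flags "m" then d.insert "chars" (PySem.Str.len text) else d
  let d := if pvFlagOn flags "l" then d.insert "lines" ((PySem.Str.count text "\n" : Nat) : Int) else d
  -- text.split('\n') is never empty, so max(...) never raises and the `.getD 0` default is unreachable
  let d := if pvFlagOn flags "L" then
      d.insert "longest_line"
        ((PySem.List.max? ((PySem.Chars.splitOn text.toList "\n".toList).map (fun l => (l.length : Int))) (fun y => y)).getD 0)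
    else d
  let d := if pvFlagOn flags "w" then d.insert "words" (((PySem.Chars.split₀ text.toList).length : Nat) : Int) else d
  d.items

-- ===== PORT B =====
-- the running state of Source B's single loop
structure PvSt where
  chars : Int
  lines : Int
  cur : Int
  longest : Int
  words : Int
  inWord : Bool
deriving Repr, DecidableEq

def pvStep (s : PvSt) (ch : Char) : PvSt :=
  let chars := s.chars + 1
  let lines := if ch = '\n' then s.lines + 1 else s.lines
  let cur := if ch = '\n' then 0 else s.cur + 1
  let longest := if cur > s.longest then cur else s.longest
  if PySem.Chars.isspace ch then
    ⟨chars, lines, cur, longest, s.words, false⟩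
  else if s.inWord then
    ⟨chars, lines, cur, longest, s.words, true⟩
  else
    ⟨chars, lines, cur, longest, s.words + 1, true⟩

def count_util_alt (text : String) (flags : Option String) : List (String × Int) :=
  let s := text.toList.foldl pvStep ⟨0, 0, 0, 0, 0, false⟩
  let counts : List (String × Int × String) :=
    [("chars", s.chars, "m"), ("lines", s.lines, "l"),
     ("longest_line", s.longest, "L"), ("words", s.words, "w")]
  (counts.filter (fun t => pvFlagOn flags t.2.2)).map (fun t => (t.1, t.2.1))

-- ===== PRECONDITION & SPEC =====
def Spec_count_util (text : String) (flags : Option String) (out : List (String × Int)) : Prop := out = count_util_alt text flags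
instance (text : String) (flags : Option String) (out : List (String × Int)) : Decidable (Spec_count_util text flags out) := by unfold Spec_count_util; infer_instance

-- ===== CLAIM (what is proved, stated in full; the proofs are below) =====
def Claim_equal_count_util : Prop := ∀ (text : String) (flags : Option String), Dom_count_util text flags → Spec_count_util text flags (count_util text flags)

-- ===== LEMMAS AND PROOFS =====

-- closed forms of the four loop components (proof-side only)
def pvCur (cur : Int) : List Char → Int
  | [] => cur
  | c :: r => pvCur (if c = '\n' then 0 else cur + 1) r

def pvLong (lg cur : Int) : List Char → Int
  | [] => lg
  | c :: r =>
    let cur' := if c = '\n' then 0 else cur + 1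
    pvLong (if cur' > lg then cur' else lg) cur' r

def pvInw (inw : Bool) : List Char → Bool
  | [] => inw
  | c :: r => pvInw (if PySem.Chars.isspace c then false else true) r

def pvWords (inw : Bool) : List Char → Int
  | [] => 0
  | c :: r =>
    if PySem.Chars.isspace c then pvWords false r
    else if inw then pvWords true r else 1 + pvWords true r

-- total word count W inw l: number of words of l, counting a word already in progress (inw)
def pvW (inw : Bool) : List Char → Int
  | [] => if inw then 1 else 0
  | c :: r => if PySem.Chars.isspace c then (if inw then 1 else 0) + pvW false r else pvW true r

-- pieces l = (first '\n'-segment of l, remaining segments)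
def pvPieces : List Char → List Char × List (List Char)
  | [] => ([], [])
  | c :: r => if c = '\n' then ([], (pvPieces r).1 :: (pvPieces r).2) else (c :: (pvPieces r).1, (pvPieces r).2)

lemma pvFold_spec (cs : List Char) (σ : PvSt) :
    cs.foldl pvStep σ =
      ⟨σ.chars + cs.length, σ.lines + (cs.count '\n' : Int), pvCur σ.cur cs,
       pvLong σ.longest σ.cur cs, σ.words + pvWords σ.inWord cs, pvInw σ.inWord cs⟩ := by
  induction cs generalizing σ with
  | nil => simp [pvCur, pvLong, pvInw, pvWords]
  | cons c r ih =>
    simp only [List.foldl_cons, ih, pvStep]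
    by_cases hsp : PySem.Chars.isspace c <;> by_cases hnl : c = '\n' <;>
      cases hin : σ.inWord <;>
      simp [pvCur, pvLong, pvInw, pvWords, hsp, hnl, hin, List.count_cons,
        (by decide : PySem.Chars.isspace '\n' = true)] <;>
      omega

lemma pvCount_go (l : List Char) (fuel : Nat) (acc : Nat) (h : l.length ≤ fuel) :
    PySem.Chars.count.go ['\n'] fuel l acc = acc + l.count '\n' := by
  induction l generalizing fuel acc with
  | nil => cases fuel <;> simp [PySem.Chars.count.go]
  | cons c r ih =>
    cases fuel with
    | zero => simp at h
    | succ f =>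
      simp only [PySem.Chars.count.go]
      simp only [List.length_cons, Nat.add_le_add_iff_right] at h
      by_cases hc : c = '\n'
      · subst hc
        rw [if_pos (by simp [List.isPrefixOf])]
        rw [show List.drop ['\n'].length ('\n' :: r) = r from rfl]
        rw [ih f (acc + 1) h]
        simp [List.count_cons]; omega
      · rw [if_neg (by simp [List.isPrefixOf, Ne.symm hc]), ih f acc h]
        simp [hc]

lemma pvSplitOn_go (l : List Char) (fuel : Nat) (cur : List Char) (acc : List (List Char))
    (h : l.length ≤ fuel) :
    PySem.Chars.splitOn.go ['\n'] fuel l cur acc =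
      acc.reverse ++ (cur.reverse ++ (pvPieces l).1) :: (pvPieces l).2 := by
  induction l generalizing fuel cur acc with
  | nil => cases fuel <;> simp [PySem.Chars.splitOn.go, pvPieces]
  | cons c r ih =>
    cases fuel with
    | zero => simp at h
    | succ f =>
      simp only [PySem.Chars.splitOn.go]
      simp only [List.length_cons, Nat.add_le_add_iff_right] at h
      by_cases hc : c = '\n'
      · subst hc
        rw [if_pos (by simp [List.isPrefixOf])]
        rw [show List.drop ['\n'].length ('\n' :: r) = r from rfl]
        rw [ih f [] (cur.reverse :: acc) h]
        simp [pvPieces]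
      · rw [if_neg (by simp [List.isPrefixOf, Ne.symm hc]), ih f (c :: cur) acc h]
        simp [pvPieces, hc]

lemma pvSplit₀_go (l : List Char) (cur : List Char) (acc : List (List Char)) :
    ((PySem.Chars.split₀.go l cur acc).length : Int) = acc.length + pvW (!cur.isEmpty) l := by
  induction l generalizing cur acc with
  | nil => cases cur <;> simp [PySem.Chars.split₀.go, pvW]
  | cons c r ih =>
    simp only [PySem.Chars.split₀.go]
    by_cases hsp : PySem.Chars.isspace c <;> cases cur <;>
      simp [hsp, pvW, ih] <;> push_cast <;> ring

lemma pvWords_eq_W (inw : Bool) (l : List Char) :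
    pvWords inw l + (if inw then 1 else 0) = pvW inw l := by
  induction l generalizing inw with
  | nil => simp [pvWords, pvW]
  | cons c r ih =>
    by_cases hsp : PySem.Chars.isspace c <;> cases inw <;>
      simp [pvWords, pvW, hsp, ← ih] <;> ring

lemma pvFoldlMax (a b : Int) (l : List Int) :
    l.foldl max (max a b) = max a (l.foldl max b) :=
  List.foldl_assoc

lemma pvLong_eq (l : List Char) (lg cur : Int) (h1 : cur ≤ lg) (h2 : 0 ≤ lg) :
    pvLong lg cur l =
      max lg (((pvPieces l).2.map (fun p => (p.length : Int))).foldl max (cur + (pvPieces l).1.length)) := by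
  induction l generalizing lg cur with
  | nil => simp [pvLong, pvPieces]; omega
  | cons c r ih =>
    by_cases hc : c = '\n'
    · subst hc
      simp only [pvLong, pvPieces, ite_true]
      rw [if_neg (by omega)]
      rw [ih lg 0 h2 h2]
      simp only [List.map_cons, List.foldl_cons, List.length_nil]
      rw [zero_add, pvFoldlMax]
      rw [show cur + ((0:Nat):Int) = cur from by push_cast; ring]
      omega
    · simp only [pvLong, pvPieces, if_neg hc]
      rw [ih (if cur + 1 > lg then cur + 1 else lg) (cur + 1) (by omega) (by omega)]
      have hle := (PySem.List.le_foldl_max ((pvPieces r).2.map (fun p => (p.length : Int))) (cur + 1 + (pvPieces r).1.length)).1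
      simp only [List.length_cons]
      rw [show cur + ((((pvPieces r).1.length) + 1 : Nat) : Int) = cur + 1 + ((pvPieces r).1.length : Int) from by push_cast; ring]
      omega

lemma pvNl : ("\n".toList : List Char) = ['\n'] := by decide

-- the four value equalities
lemma pv_chars_eq (cs : List Char) : (cs.foldl pvStep ⟨0,0,0,0,0,false⟩).chars = (cs.length : Int) := by
  rw [pvFold_spec]; simp

lemma pv_lines_eq (cs : List Char) :
    (cs.foldl pvStep ⟨0,0,0,0,0,false⟩).lines = ((PySem.Chars.count cs "\n".toList : Nat) : Int) := by
  rw [pvFold_spec]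
  simp only [PySem.Chars.count, pvNl]
  rw [if_neg (by simp)]
  rw [pvCount_go cs cs.length 0 le_rfl]
  simp

lemma pv_longest_eq (cs : List Char) :
    (cs.foldl pvStep ⟨0,0,0,0,0,false⟩).longest =
      (PySem.List.max? ((PySem.Chars.splitOn cs "\n".toList).map (fun l => (l.length : Int))) (fun y => y)).getD 0 := by
  rw [pvFold_spec]
  simp only [PySem.Chars.splitOn, pvNl]
  rw [pvSplitOn_go cs (cs.length + 1) [] [] (by omega)]
  simp only [List.reverse_nil, List.nil_append, List.map_cons, PySem.List.max?_id_cons,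
    Option.getD_some]
  show pvLong 0 0 cs = _
  rw [pvLong_eq cs 0 0 le_rfl le_rfl, zero_add]
  have hle := (PySem.List.le_foldl_max ((pvPieces cs).2.map (fun p => (p.length : Int))) ((pvPieces cs).1.length : Int)).1
  omega

lemma pv_words_eq (cs : List Char) :
    (cs.foldl pvStep ⟨0,0,0,0,0,false⟩).words = ((PySem.Chars.split₀ cs).length : Int) := by
  rw [pvFold_spec]
  simp only [PySem.Chars.split₀]
  rw [pvSplit₀_go cs [] []]
  have := pvWords_eq_W false cs
  simp at this ⊢
  omega

-- ===== VERDICT (by name: the statement is the Claim_ definition above) =====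
theorem count_util_spec : Claim_equal_count_util := by
  intro text flags _
  unfold Spec_count_util count_util count_util_alt
  rw [PySem.Str.len_eq, PySem.Str.count,
    ← pv_chars_eq text.toList, ← pv_lines_eq text.toList, ← pv_longest_eq text.toList,
    ← pv_words_eq text.toList]
  by_cases c1 : pvFlagOn flags "m" <;> by_cases c2 : pvFlagOn flags "l" <;>
    by_cases c3 : pvFlagOn flags "L" <;> by_cases c4 : pvFlagOn flags "w" <;>
    simp [c1, c2, c3, c4, PySem.Dict.items_insert_of_not_contains, PySem.Dict.contains_insert,
      PySem.Dict.contains_empty, PySem.Dict.items, PySem.Dict.empty, List.filter]
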